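-- pv_equiv track=rewrite | github.com/941design/dojo | romans_inc.py | dec
-- ===== SOURCE A (Python) =====
-- predecessors = { 'I': None,
--  	         'V': 'I',
-- 	         'X': 'V',
-- 	         'L': 'X',
-- 	         'C': 'L',
--  	         'D': 'C',
--  	         'M': 'D',
-- 	       }
--
-- def pred(numeral):
-- 	return predecessors[numeral]
--
-- def dec(r):
-- 	"""
-- 	>>> dec('II')
-- 	'I'
-- 	>>> dec('IV')
-- 	'III'
-- 	>>> dec('V')
-- 	'IV'
-- 	>>> dec('VI')
-- 	'V'
-- 	>>> dec('IX')
-- 	'VIII'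
-- 	>>> dec('X')
-- 	'IX'
-- 	>>> r = 'I'
-- 	>>> for n in range(1,3999):
-- 	...	assert(r == dec(inc(r)))
-- 	...     r = inc(r)
-- 	"""
-- 	while True:
-- 		if r.endswith('I'):
-- 			r = r[:-1]
-- 			break
-- 		elif r.endswith('IV') \
-- 		or r.endswith('XL') \
-- 		or r.endswith('CD'):
-- 			r = r[:-2] + 4 * r[-2]
-- 		if r.endswith('IX') \
-- 		or r.endswith('XC') \
-- 		or r.endswith('CM'):
-- 			r = r[:-2] + pred(r[-1]) + 4 * r[-2]
-- 		elif r.endswith('X') \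
-- 		or r.endswith('C') \
-- 		or r.endswith('M'):
-- 			r = r[:-1] + pred(pred(r[-1])) + r[-1] + pred(pred(r[-1]))
-- 		elif r.endswith('V') \
-- 		or r.endswith('L') \
-- 		or r.endswith('D'):
-- 			r = r[:-1] + pred(r[-1]) + r[-1] + pred(r[-1])
-- 	return r
-- ===== SOURCE B (Python) =====
-- # B: no loop — decrementing a Roman numeral only changes its final digit: drop a
-- # trailing unit symbol, or replace the trailing subtractive pair / symbol by its
-- # decrement from a fixed borrow table.
-- _PAIR = {'IV': 'III', 'IX': 'VIII', 'XL': 'XXXIX', 'XC': 'LXXXIX',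
--          'CD': 'CCCXCIX', 'CM': 'DCCCXCIX'}
-- _SINGLE = {'V': 'IV', 'X': 'IX', 'L': 'XLIX', 'C': 'XCIX', 'D': 'CDXCIX', 'M': 'CMXCIX'}
--
-- def dec(r):
--     if r.endswith('I'):
--         return r[:-1]
--     if r[-2:] in _PAIR:
--         return r[:-2] + _PAIR[r[-2:]]
--     return r[:-1] + _SINGLE[r[-1]]
-- ===== Notes on version B (the rewrite author's own statement) =====
-- stated objective: simpler
-- what changed: Replaced A's while-True suffix-rewriting state machine (repeatedly rewriting the tail via a predecessor table until the string ends in the unit symbol) with a single loop-free substitution: drop a trailing unit symbol, or replace the trailing subtractive pair / single symbol by its decrement from a fixed borrow table.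
import Mathlib
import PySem

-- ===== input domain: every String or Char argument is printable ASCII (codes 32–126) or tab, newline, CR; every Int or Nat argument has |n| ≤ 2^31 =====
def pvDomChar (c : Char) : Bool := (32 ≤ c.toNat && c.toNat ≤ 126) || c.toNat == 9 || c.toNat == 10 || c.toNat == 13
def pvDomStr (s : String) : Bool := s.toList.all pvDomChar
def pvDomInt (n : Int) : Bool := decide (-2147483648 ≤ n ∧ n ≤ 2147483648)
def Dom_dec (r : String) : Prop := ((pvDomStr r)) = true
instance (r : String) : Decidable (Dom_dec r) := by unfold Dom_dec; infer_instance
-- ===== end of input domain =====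

set_option maxRecDepth 20000

-- B replaces A's while-True suffix-rewriting state machine with a single loop-free
-- substitution of the final Roman digit from a fixed borrow table (simpler).

-- ===== PORT A =====
-- predecessors[c]: pred 'I' is None and other chars are a KeyError in Python; both marked
-- '?', unreachable on inputs satisfying Pre_dec
def predC (c : Char) : Char :=
  if c = 'V' then 'I' else if c = 'X' then 'V' else if c = 'L' then 'X'
  else if c = 'C' then 'L' else if c = 'D' then 'C' else if c = 'M' then 'D' else '?'

-- r[-1] / r[-2] (negative indexing); '?' marks Python's IndexError, unreachable under the
-- guarding endswith tests
def lastC (r : List Char) (i : Int) : Char := (PySem.List.pyGet? r i).getD '?'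

-- the `elif r.endswith('IV') or ... or r.endswith('CD')` rewrite of the loop body
def step1 (r : List Char) : List Char :=
  if PySem.Chars.endswith r ['I','V'] || PySem.Chars.endswith r ['X','L'] || PySem.Chars.endswith r ['C','D'] then
    PySem.List.slice r none (some (-2)) ++ List.replicate 4 (lastC r (-2))
  else r

-- the second if/elif/elif chain of the loop body
def step2 (r : List Char) : List Char :=
  if PySem.Chars.endswith r ['I','X'] || PySem.Chars.endswith r ['X','C'] || PySem.Chars.endswith r ['C','M'] then
    PySem.List.slice r none (some (-2)) ++ [predC (lastC r (-1))] ++ List.replicate 4 (lastC r (-2))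
  else if PySem.Chars.endswith r ['X'] || PySem.Chars.endswith r ['C'] || PySem.Chars.endswith r ['M'] then
    PySem.List.slice r none (some (-1)) ++ [predC (predC (lastC r (-1))), lastC r (-1), predC (predC (lastC r (-1)))]
  else if PySem.Chars.endswith r ['V'] || PySem.Chars.endswith r ['L'] || PySem.Chars.endswith r ['D'] then
    PySem.List.slice r none (some (-1)) ++ [predC (lastC r (-1)), lastC r (-1), predC (lastC r (-1))]
  else r

-- the `while True:` loop; the fuel only makes it total (on inputs satisfying Pre_dec the
-- Python loop breaks within 4 iterations; elsewhere Python loops forever, outside the claim)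
def decLoop : Nat → List Char → List Char
  | 0, r => r
  | f + 1, r =>
    if PySem.Chars.endswith r ['I'] then PySem.List.slice r none (some (-1))
    else decLoop f (step2 (step1 r))

def dec (r : String) : String := String.ofList (decLoop 16 r.toList)

-- ===== PORT B =====
def pairD : List (List Char × List Char) :=
  [(['I','V'], ['I','I','I']), (['I','X'], ['V','I','I','I']),
   (['X','L'], ['X','X','X','I','X']), (['X','C'], ['L','X','X','X','I','X']),
   (['C','D'], ['C','C','C','X','C','I','X']), (['C','M'], ['D','C','C','C','X','C','I','X'])]

def singleD : List (Char × List Char) :=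
  [('V', ['I','V']), ('X', ['I','X']), ('L', ['X','L','I','X']),
   ('C', ['X','C','I','X']), ('D', ['C','D','X','C','I','X']), ('M', ['C','M','X','C','I','X'])]

-- r[-1]; '?' marks Python's IndexError on '', and a missing _SINGLE key is Python's
-- KeyError (getD []) — both unreachable under Pre_dec
def lastB (l : List Char) : Char := (PySem.List.pyGet? l (-1)).getD '?'

def decAltL (l : List Char) : List Char :=
  if PySem.Chars.endswith l ['I'] then
    PySem.List.slice l none (some (-1))
  else
    match pairD.lookup (PySem.List.slice l (some (-2)) none) with
    | some v => PySem.List.slice l none (some (-2)) ++ v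
    | none   => PySem.List.slice l none (some (-1)) ++ ((singleD.lookup (lastB l)).getD [])

def dec_alt (r : String) : String := String.ofList (decAltL r.toList)

-- ===== PRECONDITION & SPEC =====
-- Pre_dec: the string is nonempty and ends with a Roman symbol — exactly the inputs on
-- which A's while-loop terminates (A returns on all of them, rewriting only the last one or
-- two characters); on every other string A loops forever and B raises KeyError/IndexError.
def Pre_dec (r : String) : Prop :=
  r.toList.getLast? ∈ [some 'I', some 'V', some 'X', some 'L', some 'C', some 'D', some 'M']
instance (r : String) : Decidable (Pre_dec r) := by unfold Pre_dec; infer_instance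

def pvWitness_dec : String := "IX"

def Spec_dec (r : String) (out : String) : Prop := out = dec_alt r
instance (r : String) (out : String) : Decidable (Spec_dec r out) := by unfold Spec_dec; infer_instance

-- ===== CLAIM (what is proved, stated in full; the proofs are below) =====
def Claim_equal_dec : Prop := ∀ (r : String), Dom_dec r → Pre_dec r → Spec_dec r (dec r)

-- ===== LEMMAS AND PROOFS =====

theorem suffix_of_suffix_append {l P r : List Char} (h : l <:+ P ++ r)
    (hlen : l.length ≤ r.length) : l <:+ r := by
  obtain ⟨t, ht⟩ := h
  have hl : t.length + l.length = P.length + r.length := by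
    have := congrArg List.length ht; simpa using this
  have hPt : P.length ≤ t.length := by omega
  refine ⟨t.drop P.length, ?_⟩
  have h2 := congrArg (List.drop P.length) ht
  rwa [List.drop_append_of_le_length hPt, List.drop_left] at h2

theorem endswith_one_append (P r : List Char) (c : Char) (hr : r ≠ []) :
    PySem.Chars.endswith (P ++ r) [c] = PySem.Chars.endswith r [c] := by
  rw [Bool.eq_iff_iff, PySem.Chars.endswith_iff, PySem.Chars.endswith_iff]
  constructor
  · intro h
    refine suffix_of_suffix_append h ?_
    have := List.length_pos_of_ne_nil hr
    simpa using this
  · intro h; exact h.trans (List.suffix_append P r)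

theorem endswith_two_append (P s : List Char) (x y : Char) (h2 : 2 ≤ s.length) :
    PySem.Chars.endswith (P ++ s) [x, y] = PySem.Chars.endswith s [x, y] := by
  rw [Bool.eq_iff_iff, PySem.Chars.endswith_iff, PySem.Chars.endswith_iff]
  constructor
  · intro h; exact suffix_of_suffix_append h (by simpa using h2)
  · intro h; exact h.trans (List.suffix_append P s)

theorem endswith_pair_singleton (p : List Char) (b x y : Char) :
    PySem.Chars.endswith (p ++ [b]) [x, y] = true ↔ (b = y ∧ p.getLast? = some x) := by
  rw [PySem.Chars.endswith_iff]
  constructor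
  · intro h
    obtain ⟨t, ht⟩ := h
    have ht' : (t ++ [x]) ++ [y] = p ++ [b] := by simpa [List.append_assoc] using ht
    obtain ⟨h1, h2⟩ := List.append_inj' ht' (by simp)
    refine ⟨by simpa using h2.symm, ?_⟩
    rw [← h1, List.getLast?_concat]
  · rintro ⟨rfl, hp⟩
    obtain ⟨q, rfl⟩ := List.getLast?_eq_some_iff.mp hp
    exact ⟨q, by simp⟩

theorem pair_false (p : List Char) (b x y : Char) (h : ¬ (b = y ∧ p.getLast? = some x)) :
    PySem.Chars.endswith (p ++ [b]) [x, y] = false := by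
  rw [Bool.eq_false_iff]
  intro hc
  exact h ((endswith_pair_singleton p b x y).mp hc)

theorem slice_neg_one_append (P r : List Char) (hr : r ≠ []) :
    PySem.List.slice (P ++ r) none (some (-1)) = P ++ PySem.List.slice r none (some (-1)) := by
  rw [PySem.List.slice_to_neg_one, PySem.List.slice_to_neg_one,
    List.dropLast_append_of_ne_nil hr]

theorem slice_neg_two_append (P r : List Char) (hr : 2 ≤ r.length) :
    PySem.List.slice (P ++ r) none (some (-2)) = P ++ PySem.List.slice r none (some (-2)) := by
  rw [PySem.List.slice_to_neg_ofNat _ 2 (by norm_num), PySem.List.slice_to_neg_ofNat r 2 (by norm_num)]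
  have h : (P ++ r).length - 2 = P.length + (r.length - 2) := by
    simp [List.length_append]; omega
  rw [h, List.take_length_add_append]

theorem lastC_neg_one_append (P r : List Char) (hr : r ≠ []) :
    lastC (P ++ r) (-1) = lastC r (-1) := by
  unfold lastC
  rw [PySem.List.pyGet?_neg_one, PySem.List.pyGet?_neg_one,
    List.getLast?_append_of_ne_nil _ hr]

theorem lastC_neg_two_append (P r : List Char) (hr : 2 ≤ r.length) :
    lastC (P ++ r) (-2) = lastC r (-2) := by
  unfold lastC
  rw [PySem.List.pyGet?_neg_ofNat (P ++ r) 2 (by norm_num) (by simp [List.length_append]; omega),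
    PySem.List.pyGet?_neg_ofNat r 2 (by norm_num) hr]
  have h : (P ++ r).length - 2 = P.length + (r.length - 2) := by
    simp [List.length_append]; omega
  rw [h, show ((P ++ r)[P.length + (r.length - 2)]? = r[r.length - 2]?) by
    rw [List.getElem?_append_right (by omega)]
    congr 1
    omega]

theorem lastB_append (P r : List Char) (hr : r ≠ []) : lastB (P ++ r) = lastB r := by
  unfold lastB
  rw [PySem.List.pyGet?_neg_one, PySem.List.pyGet?_neg_one,
    List.getLast?_append_of_ne_nil _ hr]

theorem step1_suffix (P s : List Char) (h2 : 2 ≤ s.length) :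
    step1 (P ++ s) = P ++ step1 s := by
  unfold step1
  rw [endswith_two_append P s 'I' 'V' h2, endswith_two_append P s 'X' 'L' h2,
      endswith_two_append P s 'C' 'D' h2]
  by_cases h : (PySem.Chars.endswith s ['I','V'] || PySem.Chars.endswith s ['X','L']
      || PySem.Chars.endswith s ['C','D']) = true
  · simp [h, slice_neg_two_append P s h2, lastC_neg_two_append P s h2]
  · simp only [Bool.not_eq_true] at h
    simp [h]

theorem step2_suffix (P s : List Char) (h2 : 2 ≤ s.length) :
    step2 (P ++ s) = P ++ step2 s := by
  have hne : s ≠ [] := by intro h; subst h; simp at h2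
  unfold step2
  rw [endswith_two_append P s 'I' 'X' h2, endswith_two_append P s 'X' 'C' h2,
      endswith_two_append P s 'C' 'M' h2,
      endswith_one_append P s 'X' hne, endswith_one_append P s 'C' hne,
      endswith_one_append P s 'M' hne, endswith_one_append P s 'V' hne,
      endswith_one_append P s 'L' hne, endswith_one_append P s 'D' hne]
  by_cases h1 : (PySem.Chars.endswith s ['I','X'] || PySem.Chars.endswith s ['X','C']
      || PySem.Chars.endswith s ['C','M']) = true
  · simp [h1, slice_neg_two_append P s h2, lastC_neg_two_append P s h2,
      lastC_neg_one_append P s hne]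
  · simp only [Bool.not_eq_true] at h1
    simp only [h1, Bool.false_eq_true, if_false]
    by_cases hx : (PySem.Chars.endswith s ['X'] || PySem.Chars.endswith s ['C']
        || PySem.Chars.endswith s ['M']) = true
    · simp [hx, slice_neg_one_append P s hne, lastC_neg_one_append P s hne]
    · simp only [Bool.not_eq_true] at hx
      simp only [hx, Bool.false_eq_true, if_false]
      by_cases hv : (PySem.Chars.endswith s ['V'] || PySem.Chars.endswith s ['L']
          || PySem.Chars.endswith s ['D']) = true
      · simp [hv, slice_neg_one_append P s hne, lastC_neg_one_append P s hne]
      · simp only [Bool.not_eq_true] at hv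
        simp [hv]

-- one non-breaking loop iteration, with the rewritten literal suffix supplied
theorem loop_lit (f : Nat) (P s t : List Char) (h2 : 2 ≤ s.length)
    (h2' : 2 ≤ (step1 s).length) (hI : PySem.Chars.endswith s ['I'] = false)
    (hst : step2 (step1 s) = t) :
    decLoop (f + 1) (P ++ s) = decLoop f (P ++ t) := by
  have hne : s ≠ [] := by intro h; subst h; simp at h2
  show (if PySem.Chars.endswith (P ++ s) ['I'] then PySem.List.slice (P ++ s) none (some (-1))
        else decLoop f (step2 (step1 (P ++ s)))) = _
  rw [endswith_one_append P s 'I' hne, hI]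
  simp only [Bool.false_eq_true, if_false]
  rw [step1_suffix P s h2, step2_suffix P (step1 s) h2', hst]

-- the breaking iteration
theorem loop_break (f : Nat) (P s : List Char) (hne : s ≠ [])
    (hI : PySem.Chars.endswith s ['I'] = true) :
    decLoop (f + 1) (P ++ s) = P ++ PySem.List.slice s none (some (-1)) := by
  show (if PySem.Chars.endswith (P ++ s) ['I'] then PySem.List.slice (P ++ s) none (some (-1))
        else decLoop f (step2 (step1 (P ++ s)))) = _
  rw [endswith_one_append P s 'I' hne, hI, if_pos rfl, slice_neg_one_append P s hne]


-- one Bool-valued test rewritten per reason it is false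
theorem pair_false_b (p : List Char) (b x y : Char) (h : b ≠ y) :
    PySem.Chars.endswith (p ++ [b]) [x, y] = false :=
  pair_false p b x y (fun hh => h hh.1)

theorem pair_false_p (p : List Char) (b x y : Char) (h : p.getLast? ≠ some x) :
    PySem.Chars.endswith (p ++ [b]) [x, y] = false :=
  pair_false p b x y (fun hh => h hh.2)

theorem ends_single_eval (p : List Char) (b c : Char) (v : Bool)
    (h : PySem.Chars.endswith [b] [c] = v) : PySem.Chars.endswith (p ++ [b]) [c] = v := by
  rw [endswith_one_append p [b] c (by simp)]; exact h

theorem slice_one (p : List Char) (c : Char) :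
    PySem.List.slice (p ++ [c]) none (some (-1)) = p := by
  rw [slice_neg_one_append p [c] (by simp), PySem.List.slice_to_neg_one]; simp

theorem lastC_one (p : List Char) (c : Char) : lastC (p ++ [c]) (-1) = c := by
  rw [lastC_neg_one_append p [c] (by simp)]
  simp [lastC, PySem.List.pyGet?_neg_one]

theorem decLoop_succ (f : Nat) (r : List Char) :
    decLoop (f + 1) r = if PySem.Chars.endswith r ['I'] then PySem.List.slice r none (some (-1))
      else decLoop f (step2 (step1 r)) := rfl

theorem loop_first_single (f : Nat) (p : List Char) (c : Char) (t : List Char)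
    (hI : PySem.Chars.endswith [c] ['I'] = false)
    (he1 : step1 (p ++ [c]) = p ++ [c]) (he2 : step2 (p ++ [c]) = p ++ t) :
    decLoop (f + 1) (p ++ [c]) = decLoop f (p ++ t) := by
  rw [decLoop_succ, endswith_one_append p [c] 'I' (by simp), hI]
  simp only [Bool.false_eq_true, if_false]
  rw [he1, he2]

-- ---------- B-side evaluation ----------

theorem t2_pair (q : List Char) (a b : Char) :
    PySem.List.slice (q ++ [a, b]) (some (-2)) none = [a, b] := by
  rw [PySem.List.slice_from_neg_ofNat _ 2 (by norm_num)]
  have h : (q ++ [a, b]).length - 2 = q.length := by simp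
  rw [h, List.drop_left]

theorem t2_single (b : Char) : PySem.List.slice [b] (some (-2)) none = [b] := by
  rw [PySem.List.slice_from_neg_ofNat _ 2 (by norm_num)]
  simp

theorem slice2_drop2 (q : List Char) (a b : Char) :
    PySem.List.slice (q ++ [a, b]) none (some (-2)) = q := by
  rw [slice_neg_two_append q [a, b] (by simp), PySem.List.slice_to_neg_ofNat _ 2 (by norm_num)]
  simp

theorem lastB_one (p : List Char) (c : Char) : lastB (p ++ [c]) = c := by
  rw [lastB_append p [c] (by simp)]
  simp [lastB, PySem.List.pyGet?_neg_one]

theorem decAltL_pair (q : List Char) (a b : Char) (v : List Char)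
    (hI : PySem.Chars.endswith [a, b] ['I'] = false)
    (hlk : pairD.lookup [a, b] = some v) :
    decAltL (q ++ [a, b]) = q ++ v := by
  unfold decAltL
  rw [endswith_one_append q [a, b] 'I' (by simp), hI]
  simp only [Bool.false_eq_true, if_false]
  rw [t2_pair q a b, hlk, slice2_drop2 q a b]

theorem decAltL_single (p : List Char) (c : Char) (v : List Char)
    (hI : PySem.Chars.endswith [c] ['I'] = false)
    (hlk : pairD.lookup (PySem.List.slice (p ++ [c]) (some (-2)) none) = none)
    (hs : singleD.lookup c = some v) :
    decAltL (p ++ [c]) = p ++ v := by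
  unfold decAltL
  rw [endswith_one_append p [c] 'I' (by simp), hI]
  simp only [Bool.false_eq_true, if_false]
  rw [hlk, slice_one p c, lastB_one p c, hs]
  simp

theorem pairD_lookup_single (c : Char) : pairD.lookup [c] = none := by
  simp [pairD, List.lookup]

theorem lk_V (a : Char) (ha : a ≠ 'I') : pairD.lookup [a, 'V'] = none := by
  simp [pairD, List.lookup, show (a == 'I') = false from beq_eq_false_iff_ne.mpr ha]

theorem lk_X (a : Char) (ha : a ≠ 'I') : pairD.lookup [a, 'X'] = none := by
  simp [pairD, List.lookup, show (a == 'I') = false from beq_eq_false_iff_ne.mpr ha]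

theorem lk_L (a : Char) (ha : a ≠ 'X') : pairD.lookup [a, 'L'] = none := by
  simp [pairD, List.lookup, show (a == 'X') = false from beq_eq_false_iff_ne.mpr ha]

theorem lk_C (a : Char) (ha : a ≠ 'X') : pairD.lookup [a, 'C'] = none := by
  simp [pairD, List.lookup, show (a == 'X') = false from beq_eq_false_iff_ne.mpr ha]

theorem lk_D (a : Char) (ha : a ≠ 'C') : pairD.lookup [a, 'D'] = none := by
  simp [pairD, List.lookup, show (a == 'C') = false from beq_eq_false_iff_ne.mpr ha]

theorem lk_M (a : Char) (ha : a ≠ 'C') : pairD.lookup [a, 'M'] = none := by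
  simp [pairD, List.lookup, show (a == 'C') = false from beq_eq_false_iff_ne.mpr ha]

theorem lookup_none_of (p : List Char) (c w : Char) (hp : p.getLast? ≠ some w)
    (hpair : ∀ a : Char, a ≠ w → pairD.lookup [a, c] = none) :
    pairD.lookup (PySem.List.slice (p ++ [c]) (some (-2)) none) = none := by
  rcases List.eq_nil_or_concat p with rfl | ⟨q, a, rfl⟩
  · rw [List.nil_append, t2_single c]
    exact pairD_lookup_single c
  · rw [List.concat_eq_append, List.append_assoc,
        show ([a] ++ [c] : List Char) = [a, c] from rfl, t2_pair q a c]
    refine hpair a (fun hac => hp ?_)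
    rw [List.concat_eq_append, List.getLast?_concat, hac]

-- ---------- the thirteen cases ----------

theorem case_I (p : List Char) : decLoop 16 (p ++ ['I']) = decAltL (p ++ ['I']) := by
  rw [show (16 : Nat) = 15 + 1 from rfl, loop_break 15 p ['I'] (by simp) (by decide)]
  unfold decAltL
  rw [endswith_one_append p ['I'] 'I' (by simp), show PySem.Chars.endswith ['I'] ['I'] = true from by decide,
    if_pos rfl, slice_neg_one_append p ['I'] (by simp)]

theorem case_IV (q : List Char) : decLoop 16 (q ++ ['I','V']) = decAltL (q ++ ['I','V']) := by
  rw [show (16 : Nat) = 15 + 1 from rfl,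
      loop_lit 15 q ['I','V'] ['I','I','I','I'] (by decide) (by decide) (by decide) (by decide),
      show (15 : Nat) = 14 + 1 from rfl,
      loop_break 14 q ['I','I','I','I'] (by decide) (by decide),
      show PySem.List.slice ['I','I','I','I'] none (some (-1)) = ['I', 'I', 'I'] from by decide,
      decAltL_pair q 'I' 'V' ['I','I','I'] (by decide) (by decide)]

theorem case_IX (q : List Char) : decLoop 16 (q ++ ['I','X']) = decAltL (q ++ ['I','X']) := by
  rw [show (16 : Nat) = 15 + 1 from rfl,
      loop_lit 15 q ['I','X'] ['V','I','I','I','I'] (by decide) (by decide) (by decide) (by decide),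
      show (15 : Nat) = 14 + 1 from rfl,
      loop_break 14 q ['V','I','I','I','I'] (by decide) (by decide),
      show PySem.List.slice ['V','I','I','I','I'] none (some (-1)) = ['V', 'I', 'I', 'I'] from by decide,
      decAltL_pair q 'I' 'X' ['V','I','I','I'] (by decide) (by decide)]

theorem case_XL (q : List Char) : decLoop 16 (q ++ ['X','L']) = decAltL (q ++ ['X','L']) := by
  rw [show (16 : Nat) = 15 + 1 from rfl,
      loop_lit 15 q ['X','L'] ['X','X','X','I','X','I'] (by decide) (by decide) (by decide) (by decide),
      show (15 : Nat) = 14 + 1 from rfl,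
      loop_break 14 q ['X','X','X','I','X','I'] (by decide) (by decide),
      show PySem.List.slice ['X','X','X','I','X','I'] none (some (-1)) = ['X', 'X', 'X', 'I', 'X'] from by decide,
      decAltL_pair q 'X' 'L' ['X','X','X','I','X'] (by decide) (by decide)]

theorem case_XC (q : List Char) : decLoop 16 (q ++ ['X','C']) = decAltL (q ++ ['X','C']) := by
  rw [show (16 : Nat) = 15 + 1 from rfl,
      loop_lit 15 q ['X','C'] ['L','X','X','X','X'] (by decide) (by decide) (by decide) (by decide),
      show (15 : Nat) = 14 + 1 from rfl,
      loop_lit 14 q ['L','X','X','X','X'] ['L','X','X','X','I','X','I'] (by decide) (by decide) (by decide) (by decide),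
      show (14 : Nat) = 13 + 1 from rfl,
      loop_break 13 q ['L','X','X','X','I','X','I'] (by decide) (by decide),
      show PySem.List.slice ['L','X','X','X','I','X','I'] none (some (-1)) = ['L', 'X', 'X', 'X', 'I', 'X'] from by decide,
      decAltL_pair q 'X' 'C' ['L','X','X','X','I','X'] (by decide) (by decide)]

theorem case_CD (q : List Char) : decLoop 16 (q ++ ['C','D']) = decAltL (q ++ ['C','D']) := by
  rw [show (16 : Nat) = 15 + 1 from rfl,
      loop_lit 15 q ['C','D'] ['C','C','C','X','C','X'] (by decide) (by decide) (by decide) (by decide),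
      show (15 : Nat) = 14 + 1 from rfl,
      loop_lit 14 q ['C','C','C','X','C','X'] ['C','C','C','X','C','I','X','I'] (by decide) (by decide) (by decide) (by decide),
      show (14 : Nat) = 13 + 1 from rfl,
      loop_break 13 q ['C','C','C','X','C','I','X','I'] (by decide) (by decide),
      show PySem.List.slice ['C','C','C','X','C','I','X','I'] none (some (-1)) = ['C', 'C', 'C', 'X', 'C', 'I', 'X'] from by decide,
      decAltL_pair q 'C' 'D' ['C','C','C','X','C','I','X'] (by decide) (by decide)]

theorem case_CM (q : List Char) : decLoop 16 (q ++ ['C','M']) = decAltL (q ++ ['C','M']) := by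
  rw [show (16 : Nat) = 15 + 1 from rfl,
      loop_lit 15 q ['C','M'] ['D','C','C','C','C'] (by decide) (by decide) (by decide) (by decide),
      show (15 : Nat) = 14 + 1 from rfl,
      loop_lit 14 q ['D','C','C','C','C'] ['D','C','C','C','X','C','X'] (by decide) (by decide) (by decide) (by decide),
      show (14 : Nat) = 13 + 1 from rfl,
      loop_lit 13 q ['D','C','C','C','X','C','X'] ['D','C','C','C','X','C','I','X','I'] (by decide) (by decide) (by decide) (by decide),
      show (13 : Nat) = 12 + 1 from rfl,
      loop_break 12 q ['D','C','C','C','X','C','I','X','I'] (by decide) (by decide),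
      show PySem.List.slice ['D','C','C','C','X','C','I','X','I'] none (some (-1)) = ['D', 'C', 'C', 'C', 'X', 'C', 'I', 'X'] from by decide,
      decAltL_pair q 'C' 'M' ['D','C','C','C','X','C','I','X'] (by decide) (by decide)]

theorem case_V (p : List Char) (hp : p.getLast? ≠ some 'I') :
    decLoop 16 (p ++ ['V']) = decAltL (p ++ ['V']) := by
  have e1 : step1 (p ++ ['V']) = p ++ ['V'] := by
    unfold step1
    rw [pair_false_p p 'V' 'I' 'V' hp, pair_false_b p 'V' 'X' 'L' (by decide),
        pair_false_b p 'V' 'C' 'D' (by decide)]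
    simp
  have e2 : step2 (p ++ ['V']) = p ++ ['I','V','I'] := by
    unfold step2
    rw [pair_false_b p 'V' 'I' 'X' (by decide), pair_false_b p 'V' 'X' 'C' (by decide),
        pair_false_b p 'V' 'C' 'M' (by decide),
        ends_single_eval p 'V' 'X' false (by decide), ends_single_eval p 'V' 'C' false (by decide),
        ends_single_eval p 'V' 'M' false (by decide), ends_single_eval p 'V' 'V' true (by decide),
        slice_one p 'V', lastC_one p 'V', show predC 'V' = 'I' from by decide]
    simp
  rw [show (16 : Nat) = 15 + 1 from rfl, loop_first_single 15 p 'V' ['I','V','I'] (by decide) e1 e2,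
      show (15 : Nat) = 14 + 1 from rfl, loop_break 14 p ['I','V','I'] (by decide) (by decide),
      show PySem.List.slice ['I','V','I'] none (some (-1)) = ['I', 'V'] from by decide,
      decAltL_single p 'V' ['I','V'] (by decide) (lookup_none_of p 'V' 'I' hp lk_V) (by decide)]

theorem case_X (p : List Char) (hp : p.getLast? ≠ some 'I') :
    decLoop 16 (p ++ ['X']) = decAltL (p ++ ['X']) := by
  have e1 : step1 (p ++ ['X']) = p ++ ['X'] := by
    unfold step1
    rw [pair_false_b p 'X' 'I' 'V' (by decide), pair_false_b p 'X' 'X' 'L' (by decide),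
        pair_false_b p 'X' 'C' 'D' (by decide)]
    simp
  have e2 : step2 (p ++ ['X']) = p ++ ['I','X','I'] := by
    unfold step2
    rw [pair_false_p p 'X' 'I' 'X' hp, pair_false_b p 'X' 'X' 'C' (by decide),
        pair_false_b p 'X' 'C' 'M' (by decide),
        ends_single_eval p 'X' 'X' true (by decide),
        slice_one p 'X', lastC_one p 'X', show predC (predC 'X') = 'I' from by decide]
    simp
  rw [show (16 : Nat) = 15 + 1 from rfl, loop_first_single 15 p 'X' ['I','X','I'] (by decide) e1 e2,
      show (15 : Nat) = 14 + 1 from rfl, loop_break 14 p ['I','X','I'] (by decide) (by decide),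
      show PySem.List.slice ['I','X','I'] none (some (-1)) = ['I', 'X'] from by decide,
      decAltL_single p 'X' ['I','X'] (by decide) (lookup_none_of p 'X' 'I' hp lk_X) (by decide)]

theorem case_L (p : List Char) (hp : p.getLast? ≠ some 'X') :
    decLoop 16 (p ++ ['L']) = decAltL (p ++ ['L']) := by
  have e1 : step1 (p ++ ['L']) = p ++ ['L'] := by
    unfold step1
    rw [pair_false_b p 'L' 'I' 'V' (by decide), pair_false_p p 'L' 'X' 'L' hp,
        pair_false_b p 'L' 'C' 'D' (by decide)]
    simp
  have e2 : step2 (p ++ ['L']) = p ++ ['X','L','X'] := by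
    unfold step2
    rw [pair_false_b p 'L' 'I' 'X' (by decide), pair_false_b p 'L' 'X' 'C' (by decide),
        pair_false_b p 'L' 'C' 'M' (by decide),
        ends_single_eval p 'L' 'X' false (by decide), ends_single_eval p 'L' 'C' false (by decide),
        ends_single_eval p 'L' 'M' false (by decide), ends_single_eval p 'L' 'V' false (by decide),
        ends_single_eval p 'L' 'L' true (by decide),
        slice_one p 'L', lastC_one p 'L', show predC 'L' = 'X' from by decide]
    simp
  rw [show (16 : Nat) = 15 + 1 from rfl, loop_first_single 15 p 'L' ['X','L','X'] (by decide) e1 e2,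
      show (15 : Nat) = 14 + 1 from rfl,
      loop_lit 14 p ['X','L','X'] ['X','L','I','X','I'] (by decide) (by decide) (by decide) (by decide),
      show (14 : Nat) = 13 + 1 from rfl, loop_break 13 p ['X','L','I','X','I'] (by decide) (by decide),
      show PySem.List.slice ['X','L','I','X','I'] none (some (-1)) = ['X', 'L', 'I', 'X'] from by decide,
      decAltL_single p 'L' ['X','L','I','X'] (by decide) (lookup_none_of p 'L' 'X' hp lk_L) (by decide)]

theorem case_C (p : List Char) (hp : p.getLast? ≠ some 'X') :
    decLoop 16 (p ++ ['C']) = decAltL (p ++ ['C']) := by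
  have e1 : step1 (p ++ ['C']) = p ++ ['C'] := by
    unfold step1
    rw [pair_false_b p 'C' 'I' 'V' (by decide), pair_false_b p 'C' 'X' 'L' (by decide),
        pair_false_b p 'C' 'C' 'D' (by decide)]
    simp
  have e2 : step2 (p ++ ['C']) = p ++ ['X','C','X'] := by
    unfold step2
    rw [pair_false_b p 'C' 'I' 'X' (by decide), pair_false_p p 'C' 'X' 'C' hp,
        pair_false_b p 'C' 'C' 'M' (by decide),
        ends_single_eval p 'C' 'X' false (by decide), ends_single_eval p 'C' 'C' true (by decide),
        slice_one p 'C', lastC_one p 'C', show predC (predC 'C') = 'X' from by decide]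
    simp
  rw [show (16 : Nat) = 15 + 1 from rfl, loop_first_single 15 p 'C' ['X','C','X'] (by decide) e1 e2,
      show (15 : Nat) = 14 + 1 from rfl,
      loop_lit 14 p ['X','C','X'] ['X','C','I','X','I'] (by decide) (by decide) (by decide) (by decide),
      show (14 : Nat) = 13 + 1 from rfl, loop_break 13 p ['X','C','I','X','I'] (by decide) (by decide),
      show PySem.List.slice ['X','C','I','X','I'] none (some (-1)) = ['X', 'C', 'I', 'X'] from by decide,
      decAltL_single p 'C' ['X','C','I','X'] (by decide) (lookup_none_of p 'C' 'X' hp lk_C) (by decide)]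

theorem case_D (p : List Char) (hp : p.getLast? ≠ some 'C') :
    decLoop 16 (p ++ ['D']) = decAltL (p ++ ['D']) := by
  have e1 : step1 (p ++ ['D']) = p ++ ['D'] := by
    unfold step1
    rw [pair_false_b p 'D' 'I' 'V' (by decide), pair_false_b p 'D' 'X' 'L' (by decide),
        pair_false_p p 'D' 'C' 'D' hp]
    simp
  have e2 : step2 (p ++ ['D']) = p ++ ['C','D','C'] := by
    unfold step2
    rw [pair_false_b p 'D' 'I' 'X' (by decide), pair_false_b p 'D' 'X' 'C' (by decide),
        pair_false_b p 'D' 'C' 'M' (by decide),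
        ends_single_eval p 'D' 'X' false (by decide), ends_single_eval p 'D' 'C' false (by decide),
        ends_single_eval p 'D' 'M' false (by decide), ends_single_eval p 'D' 'V' false (by decide),
        ends_single_eval p 'D' 'L' false (by decide), ends_single_eval p 'D' 'D' true (by decide),
        slice_one p 'D', lastC_one p 'D', show predC 'D' = 'C' from by decide]
    simp
  rw [show (16 : Nat) = 15 + 1 from rfl, loop_first_single 15 p 'D' ['C','D','C'] (by decide) e1 e2,
      show (15 : Nat) = 14 + 1 from rfl,
      loop_lit 14 p ['C','D','C'] ['C','D','X','C','X'] (by decide) (by decide) (by decide) (by decide),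
      show (14 : Nat) = 13 + 1 from rfl,
      loop_lit 13 p ['C','D','X','C','X'] ['C','D','X','C','I','X','I'] (by decide) (by decide) (by decide) (by decide),
      show (13 : Nat) = 12 + 1 from rfl, loop_break 12 p ['C','D','X','C','I','X','I'] (by decide) (by decide),
      show PySem.List.slice ['C','D','X','C','I','X','I'] none (some (-1)) = ['C', 'D', 'X', 'C', 'I', 'X'] from by decide,
      decAltL_single p 'D' ['C','D','X','C','I','X'] (by decide) (lookup_none_of p 'D' 'C' hp lk_D) (by decide)]

theorem case_M (p : List Char) (hp : p.getLast? ≠ some 'C') :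
    decLoop 16 (p ++ ['M']) = decAltL (p ++ ['M']) := by
  have e1 : step1 (p ++ ['M']) = p ++ ['M'] := by
    unfold step1
    rw [pair_false_b p 'M' 'I' 'V' (by decide), pair_false_b p 'M' 'X' 'L' (by decide),
        pair_false_b p 'M' 'C' 'D' (by decide)]
    simp
  have e2 : step2 (p ++ ['M']) = p ++ ['C','M','C'] := by
    unfold step2
    rw [pair_false_b p 'M' 'I' 'X' (by decide), pair_false_b p 'M' 'X' 'C' (by decide),
        pair_false_p p 'M' 'C' 'M' hp,
        ends_single_eval p 'M' 'X' false (by decide), ends_single_eval p 'M' 'C' false (by decide),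
        ends_single_eval p 'M' 'M' true (by decide),
        slice_one p 'M', lastC_one p 'M', show predC (predC 'M') = 'C' from by decide]
    simp
  rw [show (16 : Nat) = 15 + 1 from rfl, loop_first_single 15 p 'M' ['C','M','C'] (by decide) e1 e2,
      show (15 : Nat) = 14 + 1 from rfl,
      loop_lit 14 p ['C','M','C'] ['C','M','X','C','X'] (by decide) (by decide) (by decide) (by decide),
      show (14 : Nat) = 13 + 1 from rfl,
      loop_lit 13 p ['C','M','X','C','X'] ['C','M','X','C','I','X','I'] (by decide) (by decide) (by decide) (by decide),
      show (13 : Nat) = 12 + 1 from rfl, loop_break 12 p ['C','M','X','C','I','X','I'] (by decide) (by decide),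
      show PySem.List.slice ['C','M','X','C','I','X','I'] none (some (-1)) = ['C', 'M', 'X', 'C', 'I', 'X'] from by decide,
      decAltL_single p 'M' ['C','M','X','C','I','X'] (by decide) (lookup_none_of p 'M' 'C' hp lk_M) (by decide)]

-- ---------- assembly ----------

theorem main_case (l : List Char) (c : Char) (hc : c ∈ (['I','V','X','L','C','D','M'] : List Char))
    (hl : l.getLast? = some c) : decLoop 16 l = decAltL l := by
  obtain ⟨p, rfl⟩ := List.getLast?_eq_some_iff.mp hl
  simp only [List.mem_cons, List.not_mem_nil, or_false] at hc
  rcases hc with rfl | rfl | rfl | rfl | rfl | rfl | rfl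
  · exact case_I p
  · by_cases hp : p.getLast? = some 'I'
    · obtain ⟨q, rfl⟩ := List.getLast?_eq_some_iff.mp hp
      simpa [List.append_assoc] using case_IV q
    · exact case_V p hp
  · by_cases hp : p.getLast? = some 'I'
    · obtain ⟨q, rfl⟩ := List.getLast?_eq_some_iff.mp hp
      simpa [List.append_assoc] using case_IX q
    · exact case_X p hp
  · by_cases hp : p.getLast? = some 'X'
    · obtain ⟨q, rfl⟩ := List.getLast?_eq_some_iff.mp hp
      simpa [List.append_assoc] using case_XL q
    · exact case_L p hp
  · by_cases hp : p.getLast? = some 'X'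
    · obtain ⟨q, rfl⟩ := List.getLast?_eq_some_iff.mp hp
      simpa [List.append_assoc] using case_XC q
    · exact case_C p hp
  · by_cases hp : p.getLast? = some 'C'
    · obtain ⟨q, rfl⟩ := List.getLast?_eq_some_iff.mp hp
      simpa [List.append_assoc] using case_CD q
    · exact case_D p hp
  · by_cases hp : p.getLast? = some 'C'
    · obtain ⟨q, rfl⟩ := List.getLast?_eq_some_iff.mp hp
      simpa [List.append_assoc] using case_CM q
    · exact case_M p hp

-- ===== VERDICT (by name: the statement is the Claim_ definition above) =====
theorem dec_spec : Claim_equal_dec := by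
  intro r _ hpre
  unfold Spec_dec dec dec_alt
  unfold Pre_dec at hpre
  simp only [List.mem_cons, List.not_mem_nil, or_false] at hpre
  rcases hpre with h | h | h | h | h | h | h <;>
    exact congrArg String.ofList (main_case r.toList _ (by decide) h)
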